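-- pv_equiv track=rewrite | github.com/RatherRude/Elite-Dangerous-AI-Integration | src/lib/Actions.py | educated_guesses_message
-- ===== SOURCE A (Python) =====
-- def educated_guesses_message(search_query, valid_list):
--     # Helper function for Levenshtein distance
--     def levenshtein_distance(s1, s2):
--         if len(s1) < len(s2):
--             return levenshtein_distance(s2, s1)
--
--         if len(s2) == 0:
--             return len(s1)
--
--         previous_row = list(range(len(s2) + 1))
--         for i, c1 in enumerate(s1):
--             current_row = [i + 1]
--             for j, c2 in enumerate(s2):
--                 insertions = previous_row[j + 1] + 1
--                 deletions = current_row[j] + 1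
--                 substitutions = previous_row[j] + (c1 != c2)
--                 current_row.append(min(insertions, deletions, substitutions))
--             previous_row = current_row
--
--         return previous_row[-1]
--
--     search_lower = search_query.lower()
--     suggestions = []
--
--     # First try substring matching (existing behavior)
--     split_string = search_query.split()
--     for word in split_string:
--         for element in valid_list:
--             if word.lower() in element.lower() and element not in suggestions:
--                 suggestions.append(element)
--
--     # If we don't have enough suggestions, add fuzzy matches
--     if len(suggestions) < 5:
--         scored_matches = []
--         max_distance = max(2, len(search_query) // 3)  # Allow more errors for suggestions
--
--         for element in valid_list:
--             if element not in suggestions:  # Don't duplicate existing suggestions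
--                 distance = levenshtein_distance(search_lower, element.lower())
--                 if distance <= max_distance:
--                     scored_matches.append((distance, element))
--
--         # Sort by distance and add the best fuzzy matches
--         scored_matches.sort(key=lambda x: x[0])
--         for distance, element in scored_matches[:5 - len(suggestions)]:
--             suggestions.append(element)
--
--     message = ""
--     if suggestions:
--         guesses_str = ', '.join(suggestions[:5])  # Limit to 5 suggestions
--         message = (
--             f"Restart search with valid inputs, here are suggestions: {guesses_str}"
--         )
--
--     return message
-- ===== SOURCE B (Python) =====
-- def educated_guesses_message(search_query, valid_list):
--     # Top-down memoized Levenshtein: edit(i, j) = distance between s1[:i] and s2[:j]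
--     def levenshtein_distance(s1, s2):
--         memo = {}
--         def edit(i, j):
--             if i == 0:
--                 return j
--             if j == 0:
--                 return i
--             if (i, j) in memo:
--                 return memo[(i, j)]
--             cost = 0 if s1[i - 1] == s2[j - 1] else 1
--             d = min(edit(i - 1, j) + 1, edit(i, j - 1) + 1, edit(i - 1, j - 1) + cost)
--             memo[(i, j)] = d
--             return d
--         # warm the memo cell by cell so no edit() call recurses deeply
--         for i in range(1, len(s1) + 1):
--             for j in range(1, len(s2) + 1):
--                 edit(i, j)
--         return edit(len(s1), len(s2))
--
--     search_lower = search_query.lower()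
--     seen = set()
--     suggestions = []
--     for word in search_query.split():
--         word_lower = word.lower()
--         for element in valid_list:
--             if word_lower in element.lower() and element not in seen:
--                 seen.add(element)
--                 suggestions.append(element)
--
--     if len(suggestions) < 5:
--         max_distance = max(2, len(search_query) // 3)
--         scored = [(levenshtein_distance(search_lower, e.lower()), e)
--                   for e in valid_list if e not in seen]
--         close = [t for t in scored if t[0] <= max_distance]
--         ranked = sorted(close, key=lambda t: t[0])
--         suggestions += [e for _, e in ranked[:5 - len(suggestions)]]
--
--     if suggestions:
--         return ("Restart search with valid inputs, here are suggestions: "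
--                 + ", ".join(suggestions[:5]))
--     return ""
-- ===== Notes on version B (the rewrite author's own statement) =====
-- stated objective: alternative
-- what changed: levenshtein_distance is re-implemented as a top-down recursion on prefix-index pairs memoized in a dict (instead of A's swap-and-iterate two-row bottom-up DP), the substring phase tracks already-added elements in a set instead of scanning the suggestions list, and the fuzzy phase is built from comprehensions (score, filter by threshold, stable sort, slice) instead of A's accumulate-and-sort loops.
import Mathlib
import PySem

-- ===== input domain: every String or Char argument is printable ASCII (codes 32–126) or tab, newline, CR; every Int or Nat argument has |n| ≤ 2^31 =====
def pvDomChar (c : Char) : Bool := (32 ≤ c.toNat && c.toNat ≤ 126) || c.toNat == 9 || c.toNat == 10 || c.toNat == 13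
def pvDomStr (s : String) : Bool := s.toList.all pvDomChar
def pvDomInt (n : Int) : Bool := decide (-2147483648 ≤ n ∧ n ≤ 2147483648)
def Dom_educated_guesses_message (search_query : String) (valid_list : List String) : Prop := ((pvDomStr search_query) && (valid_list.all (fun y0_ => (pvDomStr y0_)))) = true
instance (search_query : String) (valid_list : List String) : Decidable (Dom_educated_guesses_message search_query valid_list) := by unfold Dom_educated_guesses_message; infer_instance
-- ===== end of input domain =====

-- B replaces A's bottom-up two-row Levenshtein DP by a top-down memoized recursion on
-- prefix-index pairs and tracks already-suggested elements in a set; same return value.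

-- ===== PORT A =====
-- A's levenshtein_distance: swap so s1 is the longer string, then bottom-up DP over rows.
-- rows of ints are kept as List Int; list(range(n+1)) is (List.range (n+1)).map Int.ofNat
def levA (s1 s2 : List Char) : Int :=
  if _h : s1.length < s2.length then levA s2 s1
  else if s2.length = 0 then (s1.length : Int)
  else
    let init : List Int := (List.range (s2.length + 1)).map Int.ofNat
    let final := (PySem.List.enumerate s1).foldl
      (fun prev ic =>
        (PySem.List.enumerate s2).foldl
          (fun cur jc =>
            let ins := PySem.List.pyGetD prev (jc.1 + 1) 0 + 1
            let del := PySem.List.pyGetD cur jc.1 0 + 1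
            let sub := PySem.List.pyGetD prev jc.1 0 + (if ic.2 ≠ jc.2 then (1 : Int) else 0)
            cur ++ [min ins (min del sub)])
          [ic.1 + 1])
      init
    PySem.List.pyGetD final (-1) 0
termination_by s2.length - s1.length
decreasing_by omega

def educated_guesses_message (search_query : String) (valid_list : List String) : String :=
  let search_lower := PySem.Str.lower search_query
  let split_string := PySem.Str.split₀ search_query
  let suggestions : List String := split_string.foldl (fun sugg word =>
    valid_list.foldl (fun sugg element =>
      if PySem.Str.isIn (PySem.Str.lower word) (PySem.Str.lower element) && !(sugg.contains element)
      then sugg ++ [element] else sugg) sugg) []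
  let suggestions :=
    if (suggestions.length : Int) < 5 then
      let max_distance := max 2 (PySem.Int.floordiv (PySem.Str.len search_query) 3)
      let scored_matches : List (Int × String) := valid_list.foldl (fun sc element =>
        if !(suggestions.contains element) then
          let distance := levA search_lower.toList (PySem.Str.lower element).toList
          if distance ≤ max_distance then sc ++ [(distance, element)] else sc
        else sc) []
      let scored_matches := PySem.List.sorted scored_matches (fun x => x.1)
      let extra := PySem.List.slice scored_matches none (some (5 - (suggestions.length : Int)))
      extra.foldl (fun sugg de => sugg ++ [de.2]) suggestions
    else suggestions
  if suggestions.isEmpty then ""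
  else "Restart search with valid inputs, here are suggestions: " ++
       PySem.Str.join ", " (PySem.List.slice suggestions none (some 5))

-- ===== PORT B =====
-- Source B's edit(i, j) with its memo dict threaded through the three recursive calls;
-- s1[i-1]/s2[j-1] are in range on every call Source B makes, so List.getD's default is never consulted.
def editMemoB (s1 s2 : List Char) (i j : Nat)
    (m : PySem.Dict (Nat × Nat) Int) : Int × PySem.Dict (Nat × Nat) Int :=
  match i, j with
  | 0, j => ((j : Int), m)
  | i+1, 0 => (((i : Int) + 1), m)
  | i+1, j+1 =>
    match m.get? (i+1, j+1) with
    | some v => (v, m)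
    | none =>
      let cost : Int := if s1.getD i ' ' == s2.getD j ' ' then 0 else 1
      let r1 := editMemoB s1 s2 i (j+1) m
      let r2 := editMemoB s1 s2 (i+1) j r1.2
      let r3 := editMemoB s1 s2 i j r2.2
      let d := min (r1.1 + 1) (min (r2.1 + 1) (r3.1 + cost))
      (d, r3.2.insert (i+1, j+1) d)
termination_by i + j

-- Source B warms the memo cell by cell (range(1, len+1) counters are ≥ 1, so .toNat is exact),
-- then reads off edit(len(s1), len(s2)).
def levB (s1 s2 : List Char) : Int :=
  let memo := (PySem.List.pyRange 1 ((s1.length : Int) + 1) 1).foldl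
    (fun memo i =>
      (PySem.List.pyRange 1 ((s2.length : Int) + 1) 1).foldl
        (fun memo j => (editMemoB s1 s2 i.toNat j.toNat memo).2) memo)
    PySem.Dict.empty
  (editMemoB s1 s2 s1.length s2.length memo).1

def educated_guesses_message_alt (search_query : String) (valid_list : List String) : String :=
  let search_lower := PySem.Str.lower search_query
  let st := (PySem.Str.split₀ search_query).foldl
    (fun (st : List String × PySem.Set String) word =>
      let wl := PySem.Str.lower word
      valid_list.foldl (fun st element =>
        if PySem.Str.isIn wl (PySem.Str.lower element) && !(PySem.Set.contains st.2 element)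
        then (st.1 ++ [element], PySem.Set.add st.2 element) else st) st)
    ([], PySem.Set.empty)
  let suggestions := st.1
  let seen := st.2
  let suggestions :=
    if (suggestions.length : Int) < 5 then
      let max_distance := max 2 (PySem.Int.floordiv (PySem.Str.len search_query) 3)
      let scored := (valid_list.filter (fun e => !(PySem.Set.contains seen e))).map
        (fun e => (levB search_lower.toList (PySem.Str.lower e).toList, e))
      let close := scored.filter (fun t => t.1 ≤ max_distance)
      let ranked := PySem.List.sorted close (fun t => t.1)
      suggestions ++ (PySem.List.slice ranked none (some (5 - (suggestions.length : Int)))).map (·.2)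
    else suggestions
  if suggestions.isEmpty then ""
  else "Restart search with valid inputs, here are suggestions: " ++
       PySem.Str.join ", " (PySem.List.slice suggestions none (some 5))

-- ===== PRECONDITION & SPEC =====
def Spec_educated_guesses_message (search_query : String) (valid_list : List String) (out : String) : Prop := out = educated_guesses_message_alt search_query valid_list
instance (search_query : String) (valid_list : List String) (out : String) : Decidable (Spec_educated_guesses_message search_query valid_list out) := by unfold Spec_educated_guesses_message; infer_instance

-- ===== CLAIM (what is proved, stated in full; the proofs are below) =====
def Claim_equal_educated_guesses_message : Prop := ∀ (search_query : String) (valid_list : List String), Dom_educated_guesses_message search_query valid_list → Spec_educated_guesses_message search_query valid_list (educated_guesses_message search_query valid_list)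

-- ===== LEMMAS AND PROOFS =====

-- Reference recurrence: Eref s1 s2 i j = Levenshtein distance of s1[:i] and s2[:j].
def Eref (s1 s2 : List Char) (i j : Nat) : Int :=
  match i, j with
  | 0, j => (j : Int)
  | i+1, 0 => ((i : Int) + 1)
  | i+1, j+1 =>
    min (Eref s1 s2 i (j+1) + 1)
      (min (Eref s1 s2 (i+1) j + 1)
        (Eref s1 s2 i j + (if s1.getD i ' ' ≠ s2.getD j ' ' then (1 : Int) else 0)))
termination_by i + j

theorem Eref_right_zero (s1 s2 : List Char) (i : Nat) : Eref s1 s2 i 0 = (i : Int) := by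
  cases i <;> simp [Eref]

theorem Eref_succ_succ (s1 s2 : List Char) (i j : Nat) :
    Eref s1 s2 (i+1) (j+1) =
    min (Eref s1 s2 i (j+1) + 1)
      (min (Eref s1 s2 (i+1) j + 1)
        (Eref s1 s2 i j + (if s1.getD i ' ' ≠ s2.getD j ' ' then (1 : Int) else 0))) := by
  conv_lhs => rw [Eref.eq_def]

theorem Eref_symm (s1 s2 : List Char) (i j : Nat) : Eref s1 s2 i j = Eref s2 s1 j i := by
  fun_induction Eref s1 s2 i j with
  | case1 j => rw [Eref_right_zero]
  | case2 i => simp [Eref]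
  | case3 i j ih1 ih2 ih3 =>
    rw [Eref_succ_succ, ih1, ih2, ih3]
    have hc : (if s1.getD i ' ' ≠ s2.getD j ' ' then (1:Int) else 0)
        = (if s2.getD j ' ' ≠ s1.getD i ' ' then (1:Int) else 0) := by
      by_cases h : s1.getD i ' ' = s2.getD j ' ' <;> simp [Ne, eq_comm]
    rw [hc]; rw [min_left_comm]

def ValidMemo (s1 s2 : List Char) (m : PySem.Dict (Nat × Nat) Int) : Prop :=
  ∀ i j v, m.get? (i, j) = some v → v = Eref s1 s2 i j

theorem editMemoB_correct (s1 s2 : List Char) (i j : Nat) (m : PySem.Dict (Nat × Nat) Int)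
    (hm : ValidMemo s1 s2 m) :
    (editMemoB s1 s2 i j m).1 = Eref s1 s2 i j ∧ ValidMemo s1 s2 (editMemoB s1 s2 i j m).2 := by
  fun_induction editMemoB s1 s2 i j m with
  | case1 m j => exact ⟨by simp [Eref], hm⟩
  | case2 m i => exact ⟨by simp [Eref], hm⟩
  | case3 m i j v hv => exact ⟨hm _ _ _ hv, hm⟩
  | case4 m i j hv cost r1 r2 r3 d ih1 ih2a ih2b ih3 =>
    have h1 := ih1 hm
    have h2 := ih2b h1.2
    have h3 := ih3 h2.2
    have hc : cost = (if s1.getD i ' ' ≠ s2.getD j ' ' then (1 : Int) else 0) := by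
      show (if (s1.getD i ' ' == s2.getD j ' ') = true then (0:Int) else 1) = _
      simp [ite_not]
    have hd : d = Eref s1 s2 (i+1) (j+1) := by
      show min (r1.1 + 1) (min (r2.1 + 1) (r3.1 + cost)) = _
      rw [Eref_succ_succ, hc]
      show min ((editMemoB s1 s2 i (j+1) m).1 + 1) _ = _
      rw [h1.1]
      show min _ (min ((editMemoB s1 s2 (i+1) j r1.2).1 + 1) ((editMemoB s1 s2 i j r2.2).1 + _)) = _
      rw [h2.1, h3.1]
    refine ⟨hd, ?_⟩
    intro a b v hget
    change (r3.2.insert (i+1, j+1) d).get? (a, b) = some v at hget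
    by_cases hk : (a, b) = ((i+1 : Nat), (j+1 : Nat))
    · rw [hk, PySem.Dict.get?_insert_self] at hget
      rw [Prod.mk.injEq] at hk
      obtain ⟨rfl, rfl⟩ := hk
      rw [← Option.some_inj.mp hget, hd]
    · rw [PySem.Dict.get?_insert_of_ne _ _ hk] at hget
      exact h3.2 _ _ _ hget

theorem levB_eq (s1 s2 : List Char) : levB s1 s2 = Eref s1 s2 s1.length s2.length := by
  have hempty : ValidMemo s1 s2 PySem.Dict.empty := by
    intro a b v h
    rw [PySem.Dict.get?_empty] at h
    exact absurd h (by simp)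
  have hinner : ∀ (i : Int) (l : List Int) (memo : PySem.Dict (Nat × Nat) Int), ValidMemo s1 s2 memo →
      ValidMemo s1 s2 (l.foldl (fun memo j => (editMemoB s1 s2 i.toNat j.toNat memo).2) memo) := by
    intro i l
    induction l with
    | nil => intro memo h; exact h
    | cons x xs ih => intro memo h; exact ih _ ((editMemoB_correct s1 s2 _ _ _ h).2)
  have houter : ∀ (l : List Int) (memo : PySem.Dict (Nat × Nat) Int), ValidMemo s1 s2 memo →
      ValidMemo s1 s2 (l.foldl (fun memo i =>
        (PySem.List.pyRange 1 ((s2.length : Int) + 1) 1).foldl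
          (fun memo j => (editMemoB s1 s2 i.toNat j.toNat memo).2) memo) memo) := by
    intro l
    induction l with
    | nil => intro memo h; exact h
    | cons x xs ih => intro memo h; exact ih _ (hinner _ _ _ h)
  exact (editMemoB_correct s1 s2 s1.length s2.length _ (houter _ _ hempty)).1

theorem inner_go (s1 s2 : List Char) (i : Nat) (hi : i < s1.length) :
    ∀ (t : List Char) (j0 : Nat), s2.drop j0 = t → j0 + t.length = s2.length →
    (PySem.List.enumerate t j0).foldl
      (fun cur jc =>
        let ins := PySem.List.pyGetD ((List.range (s2.length + 1)).map (fun j => Eref s1 s2 i j)) (jc.1 + 1) 0 + 1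
        let del := PySem.List.pyGetD cur jc.1 0 + 1
        let sub := PySem.List.pyGetD ((List.range (s2.length + 1)).map (fun j => Eref s1 s2 i j)) jc.1 0
          + (if s1[i] ≠ jc.2 then (1 : Int) else 0)
        cur ++ [min ins (min del sub)])
      ((List.range (j0 + 1)).map (fun j => Eref s1 s2 (i+1) j))
    = (List.range (s2.length + 1)).map (fun j => Eref s1 s2 (i+1) j) := by
  intro t
  induction t with
  | nil => intro j0 _ hlen; simp at hlen; rw [hlen]; simp [PySem.List.enumerate]
  | cons c2 t' ih =>
    intro j0 hdrop hlen
    have hj0 : j0 < s2.length := by simp at hlen; omega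
    have hc2 : s2[j0] = c2 := by
      have := List.getElem_cons_drop (as := s2) (i := j0) hj0
      rw [hdrop] at this
      exact (List.cons.injEq _ _ _ _).mp this.symm |>.1.symm
    rw [PySem.List.enumerate_cons, List.foldl_cons]
    have e1 : PySem.List.pyGetD ((List.range (s2.length + 1)).map (fun j => Eref s1 s2 i j)) ((j0:Int) + 1) 0 = Eref s1 s2 i (j0+1) := by
      have hcast : ((j0:Int)+1) = ((j0+1 : Nat) : Int) := by push_cast; ring
      rw [hcast, PySem.List.pyGetD_natCast, PySem.List.getD_map_range _ _ _ _ (by omega)]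
    have e2 : PySem.List.pyGetD ((List.range (j0 + 1)).map (fun j => Eref s1 s2 (i+1) j)) (j0:Int) 0 = Eref s1 s2 (i+1) j0 := by
      rw [PySem.List.pyGetD_natCast, PySem.List.getD_map_range _ _ _ _ (by omega)]
    have e3 : PySem.List.pyGetD ((List.range (s2.length + 1)).map (fun j => Eref s1 s2 i j)) (j0:Int) 0 = Eref s1 s2 i j0 := by
      rw [PySem.List.pyGetD_natCast, PySem.List.getD_map_range _ _ _ _ (by omega)]
    have hnew : min (Eref s1 s2 i (j0+1) + 1) (min (Eref s1 s2 (i+1) j0 + 1) (Eref s1 s2 i j0 + (if s1[i] ≠ c2 then (1:Int) else 0))) = Eref s1 s2 (i+1) (j0+1) := by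
      rw [Eref_succ_succ]
      have hg1 : s1.getD i ' ' = s1[i] := List.getD_eq_getElem _ _ hi
      have hg2 : s2.getD j0 ' ' = c2 := by rw [List.getD_eq_getElem _ _ hj0, hc2]
      rw [hg1, hg2]
    show List.foldl _ ((List.range (j0 + 1)).map (fun j => Eref s1 s2 (i+1) j) ++ [min (PySem.List.pyGetD ((List.range (s2.length + 1)).map (fun j => Eref s1 s2 i j)) ((j0:Int) + 1) 0 + 1) (min (PySem.List.pyGetD ((List.range (j0 + 1)).map (fun j => Eref s1 s2 (i+1) j)) (j0:Int) 0 + 1) (PySem.List.pyGetD ((List.range (s2.length + 1)).map (fun j => Eref s1 s2 i j)) (j0:Int) 0 + (if s1[i] ≠ c2 then (1:Int) else 0)))]) _ = _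
    rw [e1, e2, e3, hnew]
    have hacc : (List.range (j0 + 1)).map (fun j => Eref s1 s2 (i+1) j) ++ [Eref s1 s2 (i+1) (j0+1)] = (List.range (j0 + 1 + 1)).map (fun j => Eref s1 s2 (i+1) j) := by
      simp [List.range_succ]
    rw [hacc]
    exact ih (j0+1) (by have := congrArg (List.drop 1) hdrop; simpa [List.drop_drop, Nat.add_comm] using this) (by simp at hlen ⊢; omega)

theorem outer_go (s1 s2 : List Char) :
    ∀ (u : List Char) (i0 : Nat), s1.drop i0 = u → i0 + u.length = s1.length →
    (PySem.List.enumerate u i0).foldl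
      (fun prev ic =>
        (PySem.List.enumerate s2).foldl
          (fun cur jc =>
            let ins := PySem.List.pyGetD prev (jc.1 + 1) 0 + 1
            let del := PySem.List.pyGetD cur jc.1 0 + 1
            let sub := PySem.List.pyGetD prev jc.1 0 + (if ic.2 ≠ jc.2 then (1 : Int) else 0)
            cur ++ [min ins (min del sub)])
          [ic.1 + 1])
      ((List.range (s2.length + 1)).map (fun j => Eref s1 s2 i0 j))
    = (List.range (s2.length + 1)).map (fun j => Eref s1 s2 s1.length j) := by
  intro u
  induction u with
  | nil => intro i0 _ hlen; simp at hlen; rw [hlen]; simp [PySem.List.enumerate]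
  | cons c1 u' ih =>
    intro i0 hdrop hlen
    have hi0 : i0 < s1.length := by simp at hlen; omega
    have hc1 : c1 = s1[i0] := by
      have := List.getElem_cons_drop (as := s1) (i := i0) hi0
      rw [hdrop] at this
      exact ((List.cons.injEq _ _ _ _).mp this.symm).1
    subst hc1
    rw [PySem.List.enumerate_cons, List.foldl_cons]
    have hinit : [((i0 : Int)) + 1] = (List.range (0 + 1)).map (fun j => Eref s1 s2 (i0+1) j) := by
      simp [Eref_right_zero]
    have hrow := inner_go s1 s2 i0 hi0 s2 0 rfl (by simp)
    simp only [Nat.cast_zero] at hrow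
    rw [hinit]
    rw [hrow]
    rw [show ((i0 : Int)) + 1 = (((i0 + 1 : Nat)) : Int) by push_cast; ring]
    exact ih (i0+1) (by have := congrArg (List.drop 1) hdrop; simpa [List.drop_drop, Nat.add_comm] using this) (by simp at hlen ⊢; omega)

theorem pyGetD_map_range_last (f : Nat → Int) (m : Nat) :
    PySem.List.pyGetD ((List.range (m+1)).map f) (-1) 0 = f m := by
  simp [PySem.List.pyGetD, PySem.List.pyGet?, PySem.List.pyIdx?]

theorem levA_ge (s1 s2 : List Char) (h : ¬ s1.length < s2.length) :
    levA s1 s2 = Eref s1 s2 s1.length s2.length := by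
  rw [levA, dif_neg h]
  by_cases h0 : s2.length = 0
  · rw [if_pos h0, h0, Eref_right_zero]
  · rw [if_neg h0]
    have hinit : (List.range (s2.length + 1)).map Int.ofNat
        = (List.range (s2.length + 1)).map (fun j => Eref s1 s2 0 j) := by
      simp [Eref, Int.ofNat_eq_natCast]
    show PySem.List.pyGetD ((PySem.List.enumerate s1).foldl _ ((List.range (s2.length + 1)).map Int.ofNat)) (-1) 0 = _
    have hout := outer_go s1 s2 s1 0 rfl (by simp)
    simp only [Nat.cast_zero] at hout
    rw [hinit, hout, pyGetD_map_range_last]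

theorem levA_eq (s1 s2 : List Char) : levA s1 s2 = Eref s1 s2 s1.length s2.length := by
  by_cases hlt : s1.length < s2.length
  · rw [levA, dif_pos hlt, levA_ge s2 s1 (by omega), Eref_symm]
  · exact levA_ge s1 s2 hlt

theorem foldl_diag {α β : Type} (f : β → α → β) (g : β × β → α → β × β)
    (hg : ∀ s x, g (s, s) x = (f s x, f s x)) :
    ∀ (l : List α) (s : β), l.foldl g (s, s) = (l.foldl f s, l.foldl f s) := by
  intro l
  induction l with
  | nil => intro s; rfl
  | cons x xs ih => intro s; rw [List.foldl_cons, List.foldl_cons, hg, ih]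

theorem scoredA_eq (vl : List String) (S : List String) (maxd : Int) (q : List Char) :
    ∀ sc, vl.foldl (fun sc e =>
        if !(S.contains e) then
          let d := levA q (PySem.Str.lower e).toList
          if d ≤ maxd then sc ++ [(d, e)] else sc
        else sc) sc
      = sc ++ (((vl.filter (fun e => !(S.contains e))).map
          (fun e => (levA q (PySem.Str.lower e).toList, e))).filter (fun t => t.1 ≤ maxd)) := by
  induction vl with
  | nil => intro sc; simp
  | cons e vl ih =>
    intro sc
    rw [List.foldl_cons]
    by_cases hc : e ∈ S
    · rw [if_neg (by simp [hc]), ih sc, List.filter_cons, if_neg (by simp [hc])]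
    · rw [if_pos (by simp [hc])]
      by_cases hd : levA q (PySem.Str.lower e).toList ≤ maxd
      · rw [if_pos hd, ih, List.filter_cons, if_pos (by simp [hc]), List.map_cons,
          List.filter_cons, if_pos (by simpa using hd)]
        simp
      · rw [if_neg hd, ih, List.filter_cons, if_pos (by simp [hc]), List.map_cons,
          List.filter_cons, if_neg (by simpa using hd)]

theorem lev_eq2 (s1 s2 : List Char) : levA s1 s2 = levB s1 s2 := by
  rw [levA_eq, levB_eq]

theorem phase1_eq (q : String) (vl : List String) :
    (PySem.Str.split₀ q).foldl
      (fun (st : List String × PySem.Set String) word =>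
        let wl := PySem.Str.lower word
        vl.foldl (fun st element =>
          if PySem.Str.isIn wl (PySem.Str.lower element) && !(PySem.Set.contains st.2 element)
          then (st.1 ++ [element], PySem.Set.add st.2 element) else st) st)
      ([], PySem.Set.empty)
    = ((PySem.Str.split₀ q).foldl (fun sugg word =>
        vl.foldl (fun sugg element =>
          if PySem.Str.isIn (PySem.Str.lower word) (PySem.Str.lower element) && !(sugg.contains element)
          then sugg ++ [element] else sugg) sugg) [],
       (PySem.Str.split₀ q).foldl (fun sugg word =>
        vl.foldl (fun sugg element =>
          if PySem.Str.isIn (PySem.Str.lower word) (PySem.Str.lower element) && !(sugg.contains element)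
          then sugg ++ [element] else sugg) sugg) []) := by
  rw [show (([] : List String), (PySem.Set.empty : PySem.Set String))
      = ((([] : List String), ([] : List String)) : List String × PySem.Set String) from rfl]
  apply foldl_diag
  intro s word
  show vl.foldl _ (s, s)
    = (vl.foldl (fun sugg element =>
        if PySem.Str.isIn (PySem.Str.lower word) (PySem.Str.lower element) && !(sugg.contains element)
        then sugg ++ [element] else sugg) s,
       vl.foldl (fun sugg element =>
        if PySem.Str.isIn (PySem.Str.lower word) (PySem.Str.lower element) && !(sugg.contains element)
        then sugg ++ [element] else sugg) s)
  apply foldl_diag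
  intro s' e
  show (if PySem.Str.isIn (PySem.Str.lower word) (PySem.Str.lower e) && !(PySem.Set.contains (s' : PySem.Set String) e)
      then (s' ++ [e], PySem.Set.add s' e) else (s', s'))
    = (if PySem.Str.isIn (PySem.Str.lower word) (PySem.Str.lower e) && !(s'.contains e) then s' ++ [e] else s',
       if PySem.Str.isIn (PySem.Str.lower word) (PySem.Str.lower e) && !(s'.contains e) then s' ++ [e] else s')
  by_cases hm : e ∈ s'
  · rw [if_neg (by simp [PySem.Set.contains, hm]), if_neg (by simp [hm])]
  · by_cases hin : PySem.Str.isIn (PySem.Str.lower word) (PySem.Str.lower e) = true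
    · have hin' : PySem.Chars.isIn (PySem.Chars.lower word.toList) (PySem.Chars.lower e.toList) = true := by
        simpa using hin
      rw [if_pos (by simp [PySem.Set.contains, hm, hin']), if_pos (by simp [hm, hin'])]
      simp [PySem.Set.add, PySem.Set.contains, hm]
    · have hin' : PySem.Chars.isIn (PySem.Chars.lower word.toList) (PySem.Chars.lower e.toList) = false := by
        simpa using hin
      rw [if_neg (by simp [hin']), if_neg (by simp [hin'])]

theorem outer_eq (q : String) (vl : List String) :
    educated_guesses_message q vl = educated_guesses_message_alt q vl := by
  unfold educated_guesses_message educated_guesses_message_alt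
  rw [phase1_eq q vl]
  simp only []
  set S := List.foldl (fun sugg word => List.foldl (fun sugg element =>
      if (PySem.Str.isIn (PySem.Str.lower word) (PySem.Str.lower element) && !(sugg.contains element)) = true
      then sugg ++ [element] else sugg) sugg vl) [] (PySem.Str.split₀ q) with hS
  by_cases h5 : ((S.length : Int) < 5)
  · rw [if_pos h5, if_pos h5]
    rw [scoredA_eq vl S (max 2 (PySem.Int.floordiv (PySem.Str.len q) 3)) (PySem.Str.lower q).toList []]
    rw [List.nil_append]
    simp only [lev_eq2, PySem.Set.contains]
    rw [PySem.List.foldl_append_singleton_eq_map]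
  · rw [if_neg h5, if_neg h5]

-- ===== VERDICT (by name: the statement is the Claim_ definition above) =====
theorem educated_guesses_message_spec : Claim_equal_educated_guesses_message := by
  intro search_query valid_list _
  unfold Spec_educated_guesses_message
  exact outer_eq search_query valid_list
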